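-- pv_equiv track=rewrite | github.com/qeedquan/challenges | leetcode/best-meeting-point.py | count
-- ===== SOURCE A (Python) =====
-- def count(l):
--     r = 0
--     i = 0
--     j = len(l) - 1
--     while i < j:
--         r += l[j] - l[i]
--         i += 1
--         j -= 1
--     return r
-- ===== SOURCE B (Python) =====
-- def count(l):
--     n = len(l)
--     k = n // 2
--     return sum(l[n-k:]) - sum(l[:k])
-- ===== Notes on version B (the rewrite author's own statement) =====
-- stated objective: simpler
-- what changed: Replaces the two-pointer inward pairing loop with a closed-form decomposition: the answer equals the sum of the last n//2 elements minus the sum of the first n//2 elements, computed as two slice sums.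
import Mathlib
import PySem

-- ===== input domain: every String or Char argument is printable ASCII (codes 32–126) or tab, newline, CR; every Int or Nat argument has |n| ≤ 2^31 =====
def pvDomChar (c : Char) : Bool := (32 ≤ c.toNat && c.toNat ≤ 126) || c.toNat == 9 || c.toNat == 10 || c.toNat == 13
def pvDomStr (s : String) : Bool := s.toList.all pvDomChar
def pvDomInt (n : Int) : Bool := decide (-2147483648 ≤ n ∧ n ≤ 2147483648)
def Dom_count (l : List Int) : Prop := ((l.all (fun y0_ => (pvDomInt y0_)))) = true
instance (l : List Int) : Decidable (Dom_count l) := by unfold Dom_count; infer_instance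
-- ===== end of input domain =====

-- B replaces A's inward two-pointer pairing loop with two slice sums (last n//2 minus first n//2); objective: simpler.

-- ===== PORT A =====
-- while i < j: r += l[j] - l[i]; i += 1; j -= 1  (indices are always in range, so pyGetD's default is never used)
def countLoop (l : List Int) (r i j : Int) : Int :=
  if i < j then
    countLoop l (r + (PySem.List.pyGetD l j 0 - PySem.List.pyGetD l i 0)) (i + 1) (j - 1)
  else r
termination_by (j - i).toNat
decreasing_by omega

def count (l : List Int) : Int := countLoop l 0 0 ((l.length : Int) - 1)

-- ===== PORT B =====
def count_alt (l : List Int) : Int :=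
  let n : Int := l.length
  let k : Int := PySem.Int.floordiv n 2
  (PySem.List.slice l (some (n - k)) none).sum - (PySem.List.slice l none (some k)).sum

-- ===== PRECONDITION & SPEC =====
def Spec_count (l : List Int) (out : Int) : Prop := out = count_alt l
instance (l : List Int) (out : Int) : Decidable (Spec_count l out) := by unfold Spec_count; infer_instance

-- ===== CLAIM (what is proved, stated in full; the proofs are below) =====
def Claim_equal_count : Prop := ∀ (l : List Int), Dom_count l → Spec_count l (count l)

-- ===== LEMMAS AND PROOFS =====

-- sum of the segment [a, a+t) of l
def seg (l : List Int) (a t : Nat) : Int := ((l.drop a).take t).sum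

lemma seg_front (l : List Int) (a t : Nat) :
    seg l a (t + 1) = l.getD a 0 + seg l (a + 1) t := by
  unfold seg
  by_cases h : a < l.length
  · rw [List.drop_eq_getElem_cons h, List.take_succ_cons, List.sum_cons, List.getD,
      List.getElem?_eq_getElem h]
    rfl
  · rw [List.drop_eq_nil_of_le (by omega), List.drop_eq_nil_of_le (by omega), List.getD,
      List.getElem?_eq_none (by omega)]
    simp

lemma seg_last (l : List Int) (a t : Nat) :
    seg l a (t + 1) = seg l a t + l.getD (a + t) 0 := by
  unfold seg
  rw [List.take_add_one, List.sum_append, List.getD, ← List.getElem?_drop]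
  cases (l.drop a)[t]? <;> simp

lemma loop_eq (d : Nat) : ∀ (l : List Int) (r : Int) (i j : Nat), j - i = d → j < l.length →
    countLoop l r i j = r + seg l (j + 1 - (d + 1) / 2) ((d + 1) / 2) - seg l i ((d + 1) / 2) := by
  induction d using Nat.strong_induction_on with
  | _ d IH =>
    intro l r i j hd hj
    by_cases hij : (i : Int) < (j : Int)
    · have hij' : i < j := by exact_mod_cast hij
      rw [countLoop, if_pos hij, PySem.List.pyGetD_natCast, PySem.List.pyGetD_natCast]
      have hcast : ((i : Int) + 1) = ((i + 1 : Nat) : Int) := by push_cast; ring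
      have hcast2 : ((j : Int) - 1) = ((j - 1 : Nat) : Int) := by omega
      rw [hcast, hcast2]
      rw [IH (d - 2) (by omega) l (r + (l.getD j 0 - l.getD i 0)) (i + 1) (j - 1)
        (by omega) (by omega)]
      set t := (d + 1) / 2 with ht
      have ht' : (d - 2 + 1) / 2 = t - 1 := by omega
      have ht1 : 1 ≤ t := by omega
      have h1 : t - 1 + 1 = t := by omega
      rw [ht']
      have hstart : (j - 1) + 1 - (t - 1) = j + 1 - t := by omega
      rw [hstart]
      have hjside : seg l (j + 1 - t) t = seg l (j + 1 - t) (t - 1) + l.getD j 0 := by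
        have := seg_last l (j + 1 - t) (t - 1)
        rw [h1, show j + 1 - t + (t - 1) = j from by omega] at this
        exact this
      have hiside : seg l i t = l.getD i 0 + seg l (i + 1) (t - 1) := by
        have := seg_front l i (t - 1)
        rw [h1] at this
        exact this
      rw [hjside, hiside]
      ring
    · have : d = 0 := by omega
      subst this
      rw [countLoop, if_neg hij]
      simp [seg]

theorem count_spec : Claim_equal_count := by
  intro l _
  unfold Spec_count count count_alt
  by_cases hl : l = []
  · subst hl
    rw [countLoop]
    norm_num [PySem.List.slice, PySem.Int.floordiv]
  · show countLoop l 0 0 ((l.length : Int) - 1) =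
      (PySem.List.slice l (some ((l.length : Int) - PySem.Int.floordiv (l.length : Int) 2)) none).sum
        - (PySem.List.slice l none (some (PySem.Int.floordiv (l.length : Int) 2))).sum
    have hn : 1 ≤ l.length := by
      cases l with
      | nil => simp_all
      | cons a t => simp
    set n := l.length with hnn
    have hcast : ((n : Int) - 1) = ((n - 1 : Nat) : Int) := by omega
    rw [hcast]
    have h := loop_eq (n - 1) l 0 0 (n - 1) (by omega) (by omega)
    simp only [Nat.cast_zero] at h
    rw [h]
    have ht : (n - 1 + 1) / 2 = n / 2 := by omega
    rw [ht]
    have hk : PySem.Int.floordiv (n : Int) 2 = ((n / 2 : Nat) : Int) := by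
      exact_mod_cast PySem.Int.floordiv_natCast n 2
    rw [hk]
    have hfrom : ((n : Int) - ((n / 2 : Nat) : Int)) = ((n - n / 2 : Nat) : Int) := by omega
    rw [hfrom, PySem.List.slice_from_natCast, PySem.List.slice_to_natCast]
    have hstart : n - 1 + 1 - n / 2 = n - n / 2 := by omega
    rw [hstart]
    have hseg : seg l (n - n / 2) (n / 2) = (l.drop (n - n / 2)).sum := by
      have hdroplen : (l.drop (n - n / 2)).length = n / 2 := by simp [← hnn]; omega
      unfold seg; rw [List.take_of_length_le (le_of_eq hdroplen)]
    rw [hseg]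
    unfold seg
    simp
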